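-- pv_equiv track=rewrite | github.com/1s0m0rph/CryptoTools | crypto_tools.py | nums_to_ascii
-- ===== SOURCE A (Python) =====
-- import math
--
-- def nums_to_ascii(nums,block_size):
-- 	msg = ''
-- 	i_block_width = 3  # technically floor(log10(256))+1 but that's just 3
-- 	s_block_width = (int(math.log10(block_size)) + 1) // i_block_width
-- 	for num in nums:
-- 		#pad with zeroes
-- 		numst = str(num)
-- 		while (len(numst) % i_block_width) != 0:
-- 			numst = '0' + numst
-- 		for chsq in [numst[i:i+i_block_width] for i in range(0,len(numst),i_block_width)]:
-- 			numv = int(chsq)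
-- 			msg += chr(numv)
-- 	return msg
-- ===== SOURCE B (Python) =====
-- def nums_to_ascii(nums, block_size):
--     chars = []
--     for num in nums:
--         k = 1
--         while 1000 ** k <= num:
--             k += 1
--         for j in range(k - 1, -1, -1):
--             chars.append(chr(num // 1000 ** j % 1000))
--     return ''.join(chars)
-- ===== Notes on version B (the rewrite author's own statement) =====
-- stated objective: alternative
-- what changed: Replaces string padding + 3-character slicing + int() parsing of each chunk by pure arithmetic: count base-1000 digits with a comparison loop and extract each chunk as num // 1000**j % 1000, collecting characters in a list joined once (avoids per-number string construction and repeated string concatenation).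
import Mathlib
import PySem

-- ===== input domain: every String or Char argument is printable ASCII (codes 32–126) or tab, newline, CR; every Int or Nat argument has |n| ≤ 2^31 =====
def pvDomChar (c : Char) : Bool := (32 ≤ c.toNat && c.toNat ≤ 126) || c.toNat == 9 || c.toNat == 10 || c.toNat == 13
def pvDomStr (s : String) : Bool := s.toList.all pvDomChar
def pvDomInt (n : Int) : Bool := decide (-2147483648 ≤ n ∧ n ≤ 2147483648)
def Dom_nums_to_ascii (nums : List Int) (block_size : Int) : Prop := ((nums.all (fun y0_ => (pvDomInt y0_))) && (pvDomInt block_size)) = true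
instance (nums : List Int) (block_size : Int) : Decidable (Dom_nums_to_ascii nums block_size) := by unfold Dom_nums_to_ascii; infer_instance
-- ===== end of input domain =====

-- B replaces A's string padding / 3-char slicing / int() parsing by arithmetic base-1000 chunk
-- extraction (alternative decomposition, no speed claim); Pre_ excludes the inputs where A raises.


-- ===== PORT A =====

-- the 'while (len(numst) % 3) != 0: numst = '0' + numst' padding loop
def padLoop (s : List Char) : List Char :=
  if s.length % 3 ≠ 0 then padLoop ('0' :: s) else s
termination_by (3 - s.length % 3) % 3
decreasing_by simp only [List.length_cons]; omega

-- A's line 's_block_width = (int(math.log10(block_size)) + 1) // 3' computes a float-based value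
-- that is NEVER used afterwards; math.log10 raises ValueError for block_size <= 0, which
-- Pre_nums_to_ascii excludes, so the dead line is ported only as this comment.
def nums_to_ascii (nums : List Int) (block_size : Int) : String :=
  let msg : List Char :=
    nums.foldl (fun msg num =>
      let numst := PySem.Int.toChars num
      let numst := padLoop numst
      ((PySem.List.pyRange 0 (numst.length : Int) 3).map
        (fun i => PySem.List.slice numst (some i) (some (i + 3)))).foldl
        (fun msg chsq =>
          -- int(chsq): ValueError = none, unreachable under Pre_; chr(numv) is Char.ofNat
          -- (exact here: under Pre_ the chunk value is < 1000)
          let numv := (PySem.Int.ofChars? chsq).getD 0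
          msg ++ [Char.ofNat numv.toNat]) msg) []
  String.mk msg

-- ===== PORT B =====

-- the 'k = 1; while 1000 ** k <= num: k += 1' loop
def kLoop (num : Int) (k : Nat) : Nat :=
  if (1000 : Int) ^ k ≤ num then kLoop num (k + 1) else k
termination_by num.toNat + 1 - k
decreasing_by
  rename_i h
  have h1 : (k : Int) < (1000 : Int) ^ k := by
    have : k < 1000 ^ k := Nat.lt_pow_self (by norm_num)
    exact_mod_cast this
  omega

def nums_to_ascii_alt (nums : List Int) (block_size : Int) : String :=
  let chars : List Char :=
    nums.foldl (fun chars num =>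
      let k := kLoop num 1
      (PySem.List.pyRange ((k : Int) - 1) (-1) (-1)).foldl
        (fun chars j =>
          -- 1000 ** j with j >= 0 here; chr as in port A
          chars ++ [Char.ofNat (PySem.Int.mod (PySem.Int.floordiv num ((1000 : Int) ^ j.toNat)) 1000).toNat])
        chars) []
  String.mk chars

-- ===== PRECONDITION & SPEC =====

-- Pre_ excludes exactly the inputs where A raises: block_size <= 0 (math.log10 domain error)
-- and any negative num (the padded string '0…0-d…' makes int() raise ValueError).
def Pre_nums_to_ascii (nums : List Int) (block_size : Int) : Prop :=
  1 ≤ block_size ∧ ∀ n ∈ nums, 0 ≤ n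
instance (nums : List Int) (block_size : Int) : Decidable (Pre_nums_to_ascii nums block_size) := by
  unfold Pre_nums_to_ascii; infer_instance

def pvWitness_nums_to_ascii : List Int × Int := ([72, 101108108, 111, 0], 1000)

def Spec_nums_to_ascii (nums : List Int) (block_size : Int) (out : String) : Prop :=
  out = nums_to_ascii_alt nums block_size
instance (nums : List Int) (block_size : Int) (out : String) : Decidable (Spec_nums_to_ascii nums block_size out) := by
  unfold Spec_nums_to_ascii; infer_instance

-- ===== CLAIM (what is proved, stated in full; the proofs are below) =====
def Claim_equal_nums_to_ascii : Prop := ∀ (nums : List Int) (block_size : Int), Dom_nums_to_ascii nums block_size → Pre_nums_to_ascii nums block_size → Spec_nums_to_ascii nums block_size (nums_to_ascii nums block_size)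

-- ===== LEMMAS AND PROOFS =====

-- value of a digit list, most significant digit first
def val10 : List Nat → Nat
  | [] => 0
  | d :: l => d * 10 ^ l.length + val10 l

-- the digit list (MSB first) that str(m) prints
def digitsList (m : Nat) : List Nat :=
  if m = 0 then [0] else (Nat.digits 10 m).reverse

lemma val10_append (x y : List Nat) : val10 (x ++ y) = val10 x * 10 ^ y.length + val10 y := by
  induction x with
  | nil => simp [val10]
  | cons d l ih => simp [val10, ih, List.length_append, pow_add]; ring

lemma val10_rev_digits (m : Nat) : val10 ((Nat.digits 10 m).reverse) = m := by
  induction m using Nat.strong_induction_on with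
  | _ m ih =>
    rcases Nat.eq_zero_or_pos m with h | h
    · simp [h, val10]
    · rw [Nat.digits_def' (by norm_num : (1:Nat) < 10) h, List.reverse_cons, val10_append]
      have : m / 10 < m := Nat.div_lt_self h (by norm_num)
      simp [val10, ih _ this]
      omega

lemma val10_digitsList (m : Nat) : val10 (digitsList m) = m := by
  unfold digitsList
  split
  · simp [val10]; omega
  · exact val10_rev_digits m

lemma val10_lt (l : List Nat) (h : ∀ d ∈ l, d < 10) : val10 l < 10 ^ l.length := by
  induction l with
  | nil => simp [val10]
  | cons d t ih =>
    have hd : d < 10 := h d (by simp)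
    have ht := ih (fun x hx => h x (by simp [hx]))
    simp only [val10, List.length_cons, pow_succ]
    nlinarith

lemma toDigitsCore10 (f : Nat) : ∀ (n : Nat) (ds : List Char), n < f →
    Nat.toDigitsCore 10 f n ds = (digitsList n).map Nat.digitChar ++ ds := by
  induction f with
  | zero => intro n ds h; omega
  | succ f ih =>
    intro n ds h
    rw [Nat.toDigitsCore]
    by_cases h0 : n / 10 = 0
    · have hn : n < 10 := by omega
      simp only [h0, if_pos rfl]
      unfold digitsList
      by_cases hz : n = 0
      · subst hz; simp
      · rw [if_neg hz, Nat.digits_def' (by norm_num : (1:Nat) < 10) (by omega)]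
        have : Nat.digits 10 (n / 10) = [] := by rw [h0]; simp
        simp [this, Nat.mod_eq_of_lt hn]
    · rw [if_neg h0]
      have hrec : n / 10 < f := by
        have h10 : 10 ≤ n := by
          by_contra hc
          exact h0 (Nat.div_eq_of_lt (by omega))
        have := Nat.div_lt_self (by omega : 0 < n) (by norm_num : 1 < 10)
        omega
      rw [ih (n / 10) _ hrec]
      have hz : n ≠ 0 := by intro hz; exact h0 (by simp [hz])
      unfold digitsList
      rw [if_neg hz, if_neg h0,
        Nat.digits_def' (by norm_num : (1:Nat) < 10) (by omega : 0 < n)]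
      simp

lemma toDigits10 (m : Nat) : Nat.toDigits 10 m = (digitsList m).map Nat.digitChar := by
  have := toDigitsCore10 (m + 1) m [] (by omega)
  simpa [Nat.toDigits] using this

lemma padLoop_eq (s : List Char) :
    padLoop s = List.replicate ((3 - s.length % 3) % 3) '0' ++ s := by
  by_cases h0 : s.length % 3 = 0
  · rw [padLoop]; simp [h0]
  · by_cases h1 : s.length % 3 = 1
    · have l1 : ('0' :: s).length % 3 = 2 := by simp; omega
      have l2 : ('0' :: '0' :: s).length % 3 = 0 := by simp; omega
      rw [padLoop, if_pos (by omega), padLoop, if_pos (by simp; omega),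
        padLoop, if_neg (by simp; omega)]
      simp [h1, List.replicate]
    · have h2 : s.length % 3 = 2 := by omega
      rw [padLoop, if_pos (by omega), padLoop, if_neg (by simp; omega)]
      simp [h2, List.replicate]

lemma ofChars?_three : ∀ (a b c : Fin 10),
    PySem.Int.ofChars? [Nat.digitChar a, Nat.digitChar b, Nat.digitChar c]
      = some ((100 * (a : Nat) + 10 * b + c : Nat) : Int) := by decide

-- A's '[numst[i:i+3] for i in range(0,len(numst),3)]' as plain take/drop chunks
lemma chunk_list (L : List Char) (k : Nat) (hL : L.length = 3 * k) :
    (PySem.List.pyRange 0 (L.length : Int) 3).map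
      (fun i => PySem.List.slice L (some i) (some (i + 3)))
    = (List.range k).map (fun i => (L.drop (3 * i)).take 3) := by
  rw [PySem.List.pyRange_of_pos _ _ (by norm_num : (0:Int) < 3), hL]
  have hn : (if (0:Int) < ((3*k : Nat) : Int) then ((((3*k : Nat) : Int) - 0 + 3 - 1) / 3).toNat else 0) = k := by
    by_cases hk : k = 0
    · subst hk; simp
    · rw [if_pos (by push_cast; positivity)]
      have h3 : (((3*k : Nat) : Int) - 0 + 3 - 1) / 3 = (k : Int) := by push_cast; omega
      rw [h3]; simp
  rw [hn, List.map_map]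
  apply List.map_congr_left
  intro i _
  have h1 : (0 : Int) + 3 * (i : Int) = ((3 * i : Nat) : Int) := by push_cast; ring
  have h2 := PySem.List.slice_natCast_add L (3 * i) 3
  simp only [Function.comp_apply, h1]
  simpa using h2

-- dividing out a lower base-1000 chunk ignores the higher ones
lemma div_mod_skip (v r e s : Nat) :
    (v * 1000 ^ (e + (s + 1)) + r) / 1000 ^ e % 1000 = r / 1000 ^ e % 1000 := by
  rw [show v * 1000 ^ (e + (s + 1)) + r = r + (v * 1000 ^ s * 1000) * 1000 ^ e from by ring,
    Nat.add_mul_div_right _ _ (by positivity : 0 < 1000 ^ e),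
    Nat.add_mul_mod_self_right]

-- the per-chunk induction: parsed 3-digit chunks = base-1000 extraction
lemma core_ind : ∀ (k : Nat) (l : List Nat), (∀ d ∈ l, d < 10) → l.length = 3 * k →
    (List.range k).map
      (fun i => Char.ofNat ((PySem.Int.ofChars? (((l.map Nat.digitChar).drop (3 * i)).take 3)).getD 0).toNat)
    = (List.range k).map (fun i => Char.ofNat (val10 l / 1000 ^ (k - 1 - i) % 1000)) := by
  intro k
  induction k with
  | zero => intro l _ _; simp
  | succ k ih =>
    intro l hdig hlen
    rcases l with _ | ⟨a, _ | ⟨b, _ | ⟨c, t⟩⟩⟩ <;> simp only [List.length_nil, List.length_cons] at hlen <;> try omega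
    have ha : a < 10 := hdig a (by simp)
    have hb : b < 10 := hdig b (by simp)
    have hc : c < 10 := hdig c (by simp)
    have ht : ∀ d ∈ t, d < 10 := fun d hd => hdig d (by simp [hd])
    have htlen : t.length = 3 * k := by omega
    have hvt : val10 t < 1000 ^ k := by
      have := val10_lt t ht
      rw [htlen] at this
      calc val10 t < 10 ^ (3 * k) := this
      _ = 1000 ^ k := by rw [pow_mul]; norm_num
    have hv : 100 * a + 10 * b + c < 1000 := by omega
    have hval : val10 (a :: b :: c :: t) = (100 * a + 10 * b + c) * 1000 ^ k + val10 t := by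
      have : (a :: b :: c :: t) = [a, b, c] ++ t := rfl
      rw [this, val10_append, htlen]
      simp [val10]
      rw [pow_mul]
      norm_num
      ring
    rw [List.range_succ_eq_map]
    simp only [List.map_cons, List.map_map]
    congr 1
    · -- head chunk
      simp only [List.map_cons, List.drop_zero, Nat.mul_zero]
      have h3 : PySem.Int.ofChars? [Nat.digitChar a, Nat.digitChar b, Nat.digitChar c]
          = some ((100 * a + 10 * b + c : Nat) : Int) :=
        ofChars?_three ⟨a, ha⟩ ⟨b, hb⟩ ⟨c, hc⟩
      rw [show (Nat.digitChar a :: Nat.digitChar b :: Nat.digitChar c :: t.map Nat.digitChar).take 3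
            = [Nat.digitChar a, Nat.digitChar b, Nat.digitChar c] from rfl, h3]
      simp only [Option.getD_some, Int.toNat_natCast, Nat.add_sub_cancel, Nat.sub_zero]
      congr 1
      rw [hval, show (100 * a + 10 * b + c) * 1000 ^ k + val10 t
            = val10 t + (100 * a + 10 * b + c) * 1000 ^ k from by ring,
        Nat.add_mul_div_right _ _ (by positivity : 0 < 1000 ^ k),
        Nat.div_eq_of_lt hvt, Nat.zero_add, Nat.mod_eq_of_lt hv]
    · -- tail chunks
      have step1 : (List.range k).map
            (fun i => Char.ofNat ((PySem.Int.ofChars?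
              ((((a :: b :: c :: t).map Nat.digitChar).drop (3 * (Nat.succ i))).take 3)).getD 0).toNat)
          = (List.range k).map
            (fun i => Char.ofNat ((PySem.Int.ofChars?
              (((t.map Nat.digitChar).drop (3 * i)).take 3)).getD 0).toNat) := by
        apply List.map_congr_left
        intro i _
        have h31 : 3 * Nat.succ i = 3 * i + 3 := by omega
        simp [h31, List.drop_succ_cons]
      have step2 : (List.range k).map
            (fun i => Char.ofNat (val10 t / 1000 ^ (k - 1 - i) % 1000))
          = (List.range k).map
            (fun i => Char.ofNat (val10 (a :: b :: c :: t) / 1000 ^ (k + 1 - 1 - Nat.succ i) % 1000)) := by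
        apply List.map_congr_left
        intro i hi
        have hik : i < k := List.mem_range.mp hi
        have he : k + 1 - 1 - Nat.succ i = k - 1 - i := by omega
        rw [he, hval, show (1000 : Nat) ^ k = 1000 ^ ((k - 1 - i) + (i + 1)) from by
          congr 1; omega]
        exact congrArg Char.ofNat (div_mod_skip _ _ _ _).symm
      exact step1.trans ((ih t ht htlen).trans step2)

-- per-number core: A's chunk parsing equals arithmetic base-1000 extraction
lemma chunks_core : ∀ (k : Nat) (l : List Nat), (∀ d ∈ l, d < 10) → l.length = 3 * k →
    ((PySem.List.pyRange 0 ((l.map Nat.digitChar).length : Int) 3).map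
        (fun i => PySem.List.slice (l.map Nat.digitChar) (some i) (some (i + 3)))).map
      (fun chsq => Char.ofNat ((PySem.Int.ofChars? chsq).getD 0).toNat)
    = (List.range k).map (fun i => Char.ofNat (val10 l / 1000 ^ (k - 1 - i) % 1000)) := by
  intro k l hdig hlen
  rw [chunk_list (l.map Nat.digitChar) k (by simpa using hlen), List.map_map]
  exact core_ind k l hdig hlen

lemma kLoop_eq (num : Int) (k : Nat) (hk : num < 1000 ^ k) :
    ∀ j, 1 ≤ j → j ≤ k → (∀ i, j ≤ i → i < k → (1000 : Int) ^ i ≤ num) → kLoop num j = k := by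
  suffices H : ∀ d j, 1 ≤ j → j ≤ k → k - j = d →
      (∀ i, j ≤ i → i < k → (1000 : Int) ^ i ≤ num) → kLoop num j = k by
    intro j h1 h2 h3; exact H (k - j) j h1 h2 rfl h3
  intro d
  induction d with
  | zero =>
    intro j h1 h2 hd hlow
    have : j = k := by omega
    subst this
    rw [kLoop, if_neg (by omega)]
  | succ d ih =>
    intro j h1 h2 hd hlow
    have hjk : j < k := by omega
    rw [kLoop, if_pos (hlow j le_rfl hjk)]
    exact ih (j + 1) (by omega) (by omega) (by omega)
      (fun i hi1 hi2 => hlow i (by omega) hi2)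

lemma val10_replicate (p : Nat) : val10 (List.replicate p 0) = 0 := by
  induction p with
  | zero => rfl
  | succ p ih => simp [List.replicate, val10, ih]

lemma digitsList_lt (m : Nat) : ∀ d ∈ digitsList m, d < 10 := by
  intro d hd
  unfold digitsList at hd
  split at hd
  · simp at hd; omega
  · exact Nat.digits_lt_base (by norm_num) (List.mem_reverse.mp hd)

lemma digitsList_ne_nil (m : Nat) : digitsList m ≠ [] := by
  unfold digitsList
  split
  · simp
  · simp [Nat.digits_ne_nil_iff_ne_zero]
    assumption

lemma le_val10_digitsList (m : Nat) (hm : m ≠ 0) : 10 ^ ((digitsList m).length - 1) ≤ m := by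
  have hd : digitsList m = (Nat.digits 10 m).reverse := by unfold digitsList; rw [if_neg hm]
  obtain ⟨d, rest, hcons⟩ : ∃ d rest, digitsList m = d :: rest := by
    rcases h : digitsList m with _ | ⟨d, rest⟩
    · exact absurd h (digitsList_ne_nil m)
    · exact ⟨d, rest, rfl⟩
  have hdne : d ≠ 0 := by
    have h1 : (Nat.digits 10 m).reverse.head? = some d := by rw [← hd, hcons]; rfl
    rw [List.head?_reverse] at h1
    have h2 := Nat.getLast_digit_ne_zero 10 hm
    have hne : Nat.digits 10 m ≠ [] := Nat.digits_ne_nil_iff_ne_zero.mpr hm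
    rw [List.getLast?_eq_getLast hne] at h1
    intro hdz
    subst hdz
    exact h2 (Option.some_inj.mp h1)
  have hv := val10_digitsList m
  rw [hcons] at hv
  have : 10 ^ rest.length ≤ d * 10 ^ rest.length + val10 rest := by
    have h1d := Nat.one_le_iff_ne_zero.mpr hdne
    have := Nat.mul_le_mul_right (10 ^ rest.length) h1d
    omega
  calc 10 ^ ((digitsList m).length - 1) = 10 ^ rest.length := by rw [hcons]; simp
  _ ≤ d * 10 ^ rest.length + val10 rest := this
  _ = m := hv

-- per-number equality
lemma per_num (num : Int) (hnum : 0 ≤ num) :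
    ((PySem.List.pyRange 0 ((padLoop (PySem.Int.toChars num)).length : Int) 3).map
        (fun i => PySem.List.slice (padLoop (PySem.Int.toChars num)) (some i) (some (i + 3)))).map
      (fun chsq => Char.ofNat ((PySem.Int.ofChars? chsq).getD 0).toNat)
    = (PySem.List.pyRange ((kLoop num 1 : Int) - 1) (-1) (-1)).map
        (fun j => Char.ofNat (PySem.Int.mod (PySem.Int.floordiv num ((1000 : Int) ^ j.toNat)) 1000).toNat) := by
  set m := num.toNat with hm
  have hnm : num = (m : Int) := (Int.toNat_of_nonneg hnum).symm
  have htc : PySem.Int.toChars num = (digitsList m).map Nat.digitChar := by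
    rw [PySem.Int.toChars, if_neg (by omega), toDigits10]
  set dl := digitsList m with hdl
  set L0 := dl.length with hL0
  set p := (3 - L0 % 3) % 3 with hp
  set l := List.replicate p 0 ++ dl with hl
  have hL0pos : 1 ≤ L0 := by
    have := digitsList_ne_nil m
    rw [← hdl] at this
    have := List.length_pos_of_ne_nil this
    omega
  have hmod : (L0 + p) % 3 = 0 := by omega
  set k := (L0 + p) / 3 with hk
  have h3k : l.length = 3 * k := by
    simp only [hl, List.length_append, List.length_replicate, ← hL0]
    omega
  have hkpos : 1 ≤ k := by omega
  have hpad : padLoop (PySem.Int.toChars num) = l.map Nat.digitChar := by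
    rw [htc, padLoop_eq]
    simp only [List.length_map, ← hL0, ← hp, hl, List.map_append, List.map_replicate]
    rfl
  have hdig : ∀ d ∈ l, d < 10 := by
    intro d hd
    rcases List.mem_append.mp hd with h | h
    · have := List.eq_of_mem_replicate h
      omega
    · exact digitsList_lt m d h
  have hval : val10 l = m := by
    rw [hl, val10_append, val10_replicate, val10_digitsList]
    ring
  -- A side
  rw [hpad, chunks_core k l hdig h3k, hval]
  -- B side: the counting loop returns k
  have hmlt : m < 1000 ^ k := by
    have h1 : m < 10 ^ L0 := by
      rw [← hval, hl, val10_append, val10_replicate]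
      have := val10_lt dl (fun d hd => digitsList_lt m d hd)
      rw [← hL0] at this
      omega
    calc m < 10 ^ L0 := h1
    _ ≤ 10 ^ (3 * k) := Nat.pow_le_pow_right (by norm_num) (by omega)
    _ = 1000 ^ k := by rw [pow_mul]; norm_num
  have hklo : ∀ i, 1 ≤ i → i < k → (1000 : Int) ^ i ≤ num := by
    intro i h1i hik
    have hmne : m ≠ 0 := by
      intro h0
      have : dl = [0] := by rw [hdl, h0]; rfl
      have hL01 : L0 = 1 := by rw [hL0, this]; rfl
      have : k = 1 := by omega
      omega
    have hlow : 10 ^ (L0 - 1) ≤ m := by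
      have := le_val10_digitsList m hmne
      rwa [← hdl, ← hL0] at this
    have h1000 : (1000 : Nat) ^ i ≤ m := by
      calc (1000 : Nat) ^ i = 10 ^ (3 * i) := by rw [pow_mul]; norm_num
      _ ≤ 10 ^ (L0 - 1) := Nat.pow_le_pow_right (by norm_num) (by omega)
      _ ≤ m := hlow
    rw [hnm]
    exact_mod_cast h1000
  have hkL : kLoop num 1 = k :=
    kLoop_eq num k (by rw [hnm]; exact_mod_cast hmlt) 1 le_rfl hkpos hklo
  rw [hkL, PySem.List.pyRange_neg_one]
  have hcnt : (((k : Int) - 1) - (-1)).toNat = k := by omega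
  rw [hcnt, List.map_map]
  apply List.map_congr_left
  intro i hi
  have hik : i < k := List.mem_range.mp hi
  have he : (((k : Int) - 1) - (i : Int)).toNat = k - 1 - i := by omega
  simp only [Function.comp_apply, he]
  have hpow : ((1000 : Int)) ^ (k - 1 - i) = ((1000 ^ (k - 1 - i) : Nat) : Int) := by push_cast; ring
  rw [hnm, hpow, PySem.Int.floordiv_natCast,
    show (1000 : Int) = ((1000 : Nat) : Int) from rfl, PySem.Int.mod_natCast,
    Int.toNat_natCast]


-- fold-append = map glue
lemma foldl_append_singleton {α : Type} (f : α → Char) (l : List α) (acc : List Char) :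
    l.foldl (fun acc x => acc ++ [f x]) acc = acc ++ l.map f := by
  induction l generalizing acc with
  | nil => simp
  | cons x t ih => simp [ih]

-- ===== VERDICT (by name: the statement is the Claim_ definition above) =====
theorem nums_to_ascii_spec : Claim_equal_nums_to_ascii := by
  intro nums bs hdom hpre
  unfold Spec_nums_to_ascii nums_to_ascii nums_to_ascii_alt
  dsimp only
  congr 1
  apply PySem.List.foldl_congr_mem
  intro acc num hmem
  rw [foldl_append_singleton, foldl_append_singleton, per_num num (hpre.2 num hmem)]
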